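-- pv_equiv track=rewrite | github.com/tn82/advent-of-code | 2024/day09/aoc.py | find_consecutive_values
-- ===== SOURCE A (Python) =====
-- def find_consecutive_values(my_list, value, count, max_index):
--   consecutive_count = 0
--   for i in range(len(my_list)):
--     if i >= max_index:
--         break
--     if my_list[i] == value:
--       consecutive_count += 1
--       if consecutive_count == count:
--         return i - count + 1
--     else:
--       consecutive_count = 0
--   return -1
-- ===== SOURCE B (Python) =====
-- def find_consecutive_values(my_list, value, count, max_index):
--     n = len(my_list)
--     if max_index < n:
--         n = max_index
--     if count < 1 or n <= 0:
--         return -1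
--     start = 0
--     while start < n:
--         end = start + 1
--         while end < n and my_list[end] == my_list[start]:
--             end += 1
--         if my_list[start] == value and end - start >= count:
--             return start
--         start = end
--     return -1
-- ===== Notes on version B (the rewrite author's own statement) =====
-- stated objective: alternative
-- what changed: Replaces A's index-by-index scan with a running consecutive-match counter by a run-jumping two-pointer walk: an inner loop finds the end of each maximal run of equal elements and the outer loop tests whether that run matches the value and is long enough, jumping straight to the next run.
import Mathlib
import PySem

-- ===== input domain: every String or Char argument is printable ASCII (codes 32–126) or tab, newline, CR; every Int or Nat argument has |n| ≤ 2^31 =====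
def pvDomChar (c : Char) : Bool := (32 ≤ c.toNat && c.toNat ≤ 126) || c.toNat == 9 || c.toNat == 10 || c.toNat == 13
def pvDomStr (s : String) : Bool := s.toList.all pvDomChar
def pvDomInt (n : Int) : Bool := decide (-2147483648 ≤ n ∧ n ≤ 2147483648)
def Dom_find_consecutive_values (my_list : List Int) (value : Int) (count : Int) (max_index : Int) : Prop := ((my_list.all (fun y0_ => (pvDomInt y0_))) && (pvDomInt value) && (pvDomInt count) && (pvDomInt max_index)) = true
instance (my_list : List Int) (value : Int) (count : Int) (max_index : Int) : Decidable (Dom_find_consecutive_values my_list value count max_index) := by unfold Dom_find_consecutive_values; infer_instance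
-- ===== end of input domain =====

-- B replaces A's index-by-index scan with a running consecutive-match counter by a
-- run-jumping two-pointer walk over maximal runs of equal elements (objective: alternative).

-- ===== PORT A =====
-- A's for-loop over range(len(my_list)) reading my_list[i], as the structural recursion
-- over the remaining suffix of the list with the index i and consecutive_count carried along;
-- the break on i >= max_index and the two early returns are kept branch for branch.
def aGo (v c mi : Int) : List Int → Int → Int → Int
  | [], _, _ => -1
  | x :: rest, i, cc =>
    if i ≥ mi then -1
    else if x = v then
      if cc + 1 = c then i - c + 1
      else aGo v c mi rest (i + 1) (cc + 1)
    else aGo v c mi rest (i + 1) 0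

def find_consecutive_values (my_list : List Int) (value : Int) (count : Int) (max_index : Int) : Int :=
  aGo value count max_index my_list 0 0

-- ===== PORT B =====
-- B's inner while loop ("while end < n and my_list[end] == my_list[start]"): count the
-- leading run equal to the run key x and return the run length together with the remaining suffix
def bRun (x : Int) : List Int → Int × List Int
  | [] => (0, [])
  | y :: ys => if y = x then let (k, r) := bRun x ys; (k + 1, r) else (0, y :: ys)

-- B's outer while loop ("while start < n"): jump run by run; the fuel argument only makes
-- the recursion on the remaining suffix structural and never runs out when fuel ≥ length
def bOuter (v c : Int) : Nat → List Int → Int → Int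
  | _, [], _ => -1
  | 0, _ :: _, _ => -1
  | fuel + 1, x :: rest, start =>
    let (k, r) := bRun x rest
    if x = v ∧ k + 1 ≥ c then start
    else bOuter v c fuel r (start + k + 1)

def find_consecutive_values_alt (my_list : List Int) (value : Int) (count : Int) (max_index : Int) : Int :=
  let n0 : Int := my_list.length
  let n : Int := if max_index < n0 then max_index else n0
  if count < 1 ∨ n ≤ 0 then -1
  else
    let tr := my_list.take n.toNat
    bOuter value count tr.length tr 0

-- ===== PRECONDITION & SPEC =====
def Spec_find_consecutive_values (my_list : List Int) (value : Int) (count : Int) (max_index : Int) (out : Int) : Prop := out = find_consecutive_values_alt my_list value count max_index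
instance (my_list : List Int) (value : Int) (count : Int) (max_index : Int) (out : Int) : Decidable (Spec_find_consecutive_values my_list value count max_index out) := by unfold Spec_find_consecutive_values; infer_instance

-- ===== CLAIM (what is proved, stated in full; the proofs are below) =====
def Claim_equal_find_consecutive_values : Prop := ∀ (my_list : List Int) (value : Int) (count : Int) (max_index : Int), Dom_find_consecutive_values my_list value count max_index → Spec_find_consecutive_values my_list value count max_index (find_consecutive_values my_list value count max_index)

-- ===== LEMMAS AND PROOFS =====

-- proof-side model of A's scan with the max_index break already applied (list pre-truncated)
def aGoNB (v c : Int) : List Int → Int → Int → Int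
  | [], _, _ => -1
  | x :: rest, i, cc =>
    if x = v then
      if cc + 1 = c then i - c + 1
      else aGoNB v c rest (i + 1) (cc + 1)
    else aGoNB v c rest (i + 1) 0

-- A's break on i >= max_index is exactly truncation of the list to the first (mi - i) elements
theorem aGo_trunc (v c mi : Int) (l : List Int) (i cc : Int) :
    aGo v c mi l i cc = aGoNB v c (l.take (mi - i).toNat) i cc := by
  induction l generalizing i cc with
  | nil => simp [aGo, aGoNB]
  | cons x rest ih =>
    by_cases hge : i ≥ mi
    · have h0 : (mi - i).toNat = 0 := by omega
      rw [h0]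
      simp [aGo, aGoNB, hge]
    · have h1 : (mi - i).toNat = (mi - (i + 1)).toNat + 1 := by omega
      rw [h1, List.take_succ_cons]
      show aGo v c mi (x :: rest) i cc = aGoNB v c (x :: _) i cc
      rw [aGo, aGoNB, if_neg hge]
      split
      · split
        · rfl
        · exact ih (i + 1) (cc + 1)
      · exact ih (i + 1) 0

-- with count < 1 the test consecutive_count + 1 == count can never fire
theorem aGoNB_neg (v c : Int) (hc : c < 1) (l : List Int) :
    ∀ i cc, 0 ≤ cc → aGoNB v c l i cc = -1 := by
  induction l with
  | nil => intro i cc _; rfl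
  | cons x rest ih =>
    intro i cc hcc
    rw [aGoNB]
    split
    · split
      · omega
      · exact ih (i + 1) (cc + 1) (by omega)
    · exact ih (i + 1) 0 (by omega)

-- when the next element does not match value, the carried counter is irrelevant
theorem aGoNB_reset (v c : Int) (r : List Int) (i cc cc' : Int)
    (h : ∀ hd, r.head? = some hd → hd ≠ v) :
    aGoNB v c r i cc = aGoNB v c r i cc' := by
  cases r with
  | nil => rfl
  | cons y ys =>
    have hy : y ≠ v := h y rfl
    rw [aGoNB, aGoNB, if_neg hy, if_neg hy]

-- scanning a run of j copies of value: either the counter reaches count inside the run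
-- (returning the position where counting started, minus what was already counted) or
-- the run is consumed with the counter advanced by j
theorem aGoNB_run (v c : Int) (j : Nat) (rest : List Int) (i cc : Int)
    (h0 : 0 ≤ cc) (h1 : cc < c) :
    aGoNB v c (List.replicate j v ++ rest) i cc =
      if c ≤ cc + (j : Int) then i - cc
      else aGoNB v c rest (i + (j : Int)) (cc + (j : Int)) := by
  induction j generalizing i cc with
  | zero =>
    have : ¬ (c ≤ cc + ((0 : Nat) : Int)) := by push_cast; omega
    rw [if_neg this]
    push_cast
    rw [add_zero, add_zero]
    simp
  | succ j ih =>
    rw [List.replicate_succ, List.cons_append, aGoNB, if_pos rfl]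
    split
    · rename_i hfire
      have : c ≤ cc + ((j + 1 : Nat) : Int) := by push_cast; omega
      rw [if_pos this]
      omega
    · rename_i hfire
      rw [ih (i + 1) (cc + 1) (by omega) (by omega)]
      have hcond : (c ≤ cc + 1 + (j : Int)) ↔ (c ≤ cc + ((j + 1 : Nat) : Int)) := by
        push_cast; omega
      have ea : i + 1 + (j : Int) = i + ((j + 1 : Nat) : Int) := by push_cast; ring
      have eb : cc + 1 + (j : Int) = cc + ((j + 1 : Nat) : Int) := by push_cast; ring
      split
      · rename_i hc1
        rw [if_pos (hcond.mp hc1)]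
        omega
      · rename_i hc1
        rw [if_neg (fun hh => hc1 (hcond.mpr hh)), ea, eb]

-- scanning a run of j copies of a non-matching element just resets the counter and moves on
theorem aGoNB_skip (v c x : Int) (hx : x ≠ v) (j : Nat) (rest : List Int) :
    ∀ i : Int, aGoNB v c (List.replicate j x ++ rest) i 0 = aGoNB v c rest (i + (j : Int)) 0 := by
  induction j with
  | zero => intro i; simp
  | succ j ih =>
    intro i
    rw [List.replicate_succ, List.cons_append, aGoNB, if_neg hx, ih (i + 1)]
    have : i + 1 + (j : Int) = i + ((j + 1 : Nat) : Int) := by push_cast; ring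
    rw [this]

-- characterisation of B's inner loop: it splits off the maximal leading run
theorem bRun_spec (x : Int) (rest : List Int) :
    ∃ pre r, bRun x rest = ((pre.length : Int), r) ∧ rest = pre ++ r ∧
      (∀ y ∈ pre, y = x) ∧ (∀ hd, r.head? = some hd → hd ≠ x) := by
  induction rest with
  | nil => exact ⟨[], [], rfl, rfl, fun y hy => absurd hy (List.not_mem_nil), fun hd h => by cases h⟩
  | cons y ys ih =>
    by_cases hy : y = x
    · obtain ⟨pre, r, h1, h2, h3, h4⟩ := ih
      refine ⟨y :: pre, r, ?_, by rw [List.cons_append, ← h2], ?_, h4⟩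
      · rw [bRun, if_pos hy, h1]
        simp only [List.length_cons]
        push_cast
        ring_nf
      · intro z hz
        rcases List.mem_cons.mp hz with rfl | hz
        · exact hy
        · exact h3 z hz
    · exact ⟨[], y :: ys, by rw [bRun, if_neg hy]; simp, rfl, fun z hz => absurd hz (List.not_mem_nil),
        fun hd h => by injection h with h; exact h ▸ hy⟩

-- main loop correspondence on the truncated list: A's counting scan = B's run-jumping walk
theorem main_loop (v c : Int) (hc : 1 ≤ c) (fuel : Nat) :
    ∀ (tr : List Int) (start : Int), tr.length ≤ fuel →
      aGoNB v c tr start 0 = bOuter v c fuel tr start := by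
  induction fuel with
  | zero =>
    intro tr start hlen
    have : tr = [] := List.eq_nil_of_length_eq_zero (by omega)
    subst this
    rfl
  | succ fuel ih =>
    intro tr start hlen
    cases tr with
    | nil => rfl
    | cons x rest =>
      obtain ⟨pre, r, h1, h2, h3, h4⟩ := bRun_spec x rest
      have hpre : pre = List.replicate pre.length x := List.eq_replicate_of_mem h3
      have hrlen : r.length ≤ fuel := by
        have := congrArg List.length h2
        simp [List.length_append] at this
        simp only [List.length_cons] at hlen
        omega
      rw [bOuter]
      rw [h1]
      simp only []
      by_cases hv : x = v
      · subst hv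
        have hdecomp : x :: rest = List.replicate (pre.length + 1) x ++ r := by
          rw [List.replicate_succ, List.cons_append]
          congr 1
          rw [h2]
          congr 1
        by_cases hge : ((pre.length : Int) + 1 ≥ c)
        · rw [if_pos ⟨rfl, hge⟩, hdecomp,
            aGoNB_run x c (pre.length + 1) r start 0 le_rfl (by omega)]
          have : c ≤ 0 + ((pre.length + 1 : Nat) : Int) := by push_cast; omega
          rw [if_pos this]
          omega
        · rw [if_neg (fun hh => hge hh.2), hdecomp,
            aGoNB_run x c (pre.length + 1) r start 0 le_rfl (by omega)]
          have : ¬ (c ≤ 0 + ((pre.length + 1 : Nat) : Int)) := by push_cast; omega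
          rw [if_neg this,
            aGoNB_reset x c r (start + ((pre.length + 1 : Nat) : Int)) (0 + ((pre.length + 1 : Nat) : Int)) 0 h4,
            ih r (start + ((pre.length + 1 : Nat) : Int)) hrlen]
          congr 1
          push_cast
          ring
      · rw [if_neg (fun hh => hv hh.1)]
        have hdecomp : x :: rest = List.replicate (pre.length + 1) x ++ r := by
          rw [List.replicate_succ, List.cons_append]
          congr 1
          rw [h2]
          congr 1
        rw [hdecomp, aGoNB_skip v c x hv (pre.length + 1) r start,
          ih r (start + ((pre.length + 1 : Nat) : Int)) hrlen]
        congr 1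
        push_cast
        ring

-- ===== VERDICT (by name: the statement is the Claim_ definition above) =====
theorem find_consecutive_values_spec : Claim_equal_find_consecutive_values := by
  intro my_list value count max_index _
  unfold Spec_find_consecutive_values find_consecutive_values find_consecutive_values_alt
  dsimp only
  set n : Int := if max_index < (my_list.length : Int) then max_index else (my_list.length : Int) with hn
  rw [aGo_trunc value count max_index my_list 0 0]
  simp only [sub_zero]
  have htake : my_list.take max_index.toNat = my_list.take n.toNat := by
    rw [hn]
    split
    · rfl
    · rename_i h
      rw [List.take_of_length_le (by omega), List.take_of_length_le (by omega)]
  rw [htake]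
  split
  · rename_i h
    rcases h with h | h
    · exact aGoNB_neg value count h _ 0 0 le_rfl
    · have : n.toNat = 0 := by omega
      rw [this, List.take_zero]
      rfl
  · rename_i h
    exact main_loop value count (by omega) _ _ 0 le_rfl
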